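-- pv_equiv track=rewrite | github.com/Jiawei-Wang/LeetCode-Study | 1433. Check If a String Can Break Another String.py | checkIfCanBreak
-- ===== SOURCE A (Python) =====
-- def checkIfCanBreak(s1: str, s2: str) -> bool:
--     count1 = [0] * 26  # Array to count occurrences of characters in s1
--     count2 = [0] * 26  # Array to count occurrences of characters in s2
--
--     # Count occurrences of characters in s1
--     for char in s1:
--         count1[ord(char) - ord('a')] += 1
--
--     # Count occurrences of characters in s2
--     for char in s2:
--         count2[ord(char) - ord('a')] += 1
--
--     # Variables to track if s1 can break s2 and vice versa
--     can_break_s1 = True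
--     can_break_s2 = True
--
--     # Check if s1 can break s2
--     diff = 0
--     for i in range(26):
--         diff += count1[i] - count2[i]
--         if diff < 0:
--             can_break_s1 = False
--             break
--
--     # Check if s2 can break s1
--     diff = 0
--     for i in range(26):
--         diff += count2[i] - count1[i]
--         if diff < 0:
--             can_break_s2 = False
--             break
--
--     # Return True if either s1 can break s2 or s2 can break s1
--     return can_break_s1 or can_break_s2
-- ===== SOURCE B (Python) =====
-- def checkIfCanBreak(s1: str, s2: str) -> bool:
--     a, b = sorted(s1), sorted(s2)
--     cb1 = len(a) >= len(b) and all(a[i] <= b[i] for i in range(len(b)))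
--     cb2 = len(b) >= len(a) and all(b[i] <= a[i] for i in range(len(a)))
--     return cb1 or cb2
-- ===== Notes on version B (the rewrite author's own statement) =====
-- stated objective: idiomatic
-- what changed: B sorts both strings and compares them position by position under a length guard, replacing A's 26-bucket counting arrays and two cumulative-difference break loops.
-- outside the precondition, e.g. on checkIfCanBreak('aH', 'bG'): A returns True, B returns False; on checkIfCanBreak('a!', 'a'): A raises IndexError, B returns True
import Mathlib
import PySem

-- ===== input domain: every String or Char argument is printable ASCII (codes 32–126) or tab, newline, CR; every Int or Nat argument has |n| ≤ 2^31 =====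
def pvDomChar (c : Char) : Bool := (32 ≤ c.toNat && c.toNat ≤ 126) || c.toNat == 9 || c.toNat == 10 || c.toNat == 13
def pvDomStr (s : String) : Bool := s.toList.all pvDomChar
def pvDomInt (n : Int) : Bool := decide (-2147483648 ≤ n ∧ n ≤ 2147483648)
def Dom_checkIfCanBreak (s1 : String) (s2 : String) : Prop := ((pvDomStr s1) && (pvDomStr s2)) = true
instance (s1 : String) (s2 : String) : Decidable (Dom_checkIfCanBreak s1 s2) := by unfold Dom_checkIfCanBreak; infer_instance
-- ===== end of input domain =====

-- B replaces A's 26-bucket counting + prefix-sum break loops by sorting both strings and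
-- comparing them position by position (idiomatic rewrite; equivalence proved on lowercase strings).

-- ===== PORT A =====
-- count[ord(ch) - ord('a')] += 1  (read then write; Python index semantics via pyGetD/pySetD)
def pvCountStep (cnt : List Int) (ch : Char) : List Int :=
  PySem.List.pySetD cnt ((ch.toNat : Int) - 97)
    (PySem.List.pyGetD cnt ((ch.toNat : Int) - 97) 0 + 1)

def pvCount (s : List Char) : List Int :=
  s.foldl pvCountStep (List.replicate 26 0)

-- 'diff = 0; for i in range(26): diff += c1[i]-c2[i]; if diff < 0: flag=False; break'
def pvDiffLoop (c1 c2 : List Int) : List Int → Int → Bool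
  | [], _ => true
  | i :: rest, diff =>
    let d := diff + (PySem.List.pyGetD c1 i 0 - PySem.List.pyGetD c2 i 0)
    if d < 0 then false else pvDiffLoop c1 c2 rest d

def checkIfCanBreak (s1 : String) (s2 : String) : Bool :=
  let count1 := pvCount s1.toList
  let count2 := pvCount s2.toList
  let can_break_s1 := pvDiffLoop count1 count2 (PySem.List.pyRange 0 26 1) 0
  let can_break_s2 := pvDiffLoop count2 count1 (PySem.List.pyRange 0 26 1) 0
  can_break_s1 || can_break_s2

-- ===== PORT B =====
-- a, b = sorted(s1), sorted(s2); two length-guarded positional scans (indices are in range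
-- under the short-circuited length guard, so getD reads exactly Python's a[i]).
def checkIfCanBreak_alt (s1 : String) (s2 : String) : Bool :=
  let a := PySem.List.sorted s1.toList (fun c => c) false
  let b := PySem.List.sorted s2.toList (fun c => c) false
  let cb1 := decide (b.length ≤ a.length) &&
    (List.range b.length).all (fun i => decide (a.getD i ' ' ≤ b.getD i ' '))
  let cb2 := decide (a.length ≤ b.length) &&
    (List.range a.length).all (fun i => decide (b.getD i ' ' ≤ a.getD i ' '))
  cb1 || cb2

-- ===== PRECONDITION & SPEC =====
-- Pre_ restricts to lowercase-only strings, the function's natural domain (LeetCode 1433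
-- guarantees lowercase input); on any other printable character A raises IndexError
-- (character codes outside 71..122), or — for codes 71..96 — counts the character through
-- accidental negative-index wraparound, a value B does not reproduce.
def Pre_checkIfCanBreak (s1 : String) (s2 : String) : Prop :=
  (s1.toList.all (fun c => c ∈ "abcdefghijklmnopqrstuvwxyz".toList) &&
   s2.toList.all (fun c => c ∈ "abcdefghijklmnopqrstuvwxyz".toList)) = true
instance (s1 : String) (s2 : String) : Decidable (Pre_checkIfCanBreak s1 s2) := by
  unfold Pre_checkIfCanBreak; infer_instance

def pvWitness_checkIfCanBreak : String × String := ("abc", "xya")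

def Spec_checkIfCanBreak (s1 : String) (s2 : String) (out : Bool) : Prop := out = checkIfCanBreak_alt s1 s2
instance (s1 : String) (s2 : String) (out : Bool) : Decidable (Spec_checkIfCanBreak s1 s2 out) := by unfold Spec_checkIfCanBreak; infer_instance

-- ===== CLAIM (what is proved, stated in full; the proofs are below) =====
def Claim_equal_checkIfCanBreak : Prop := ∀ (s1 : String) (s2 : String), Dom_checkIfCanBreak s1 s2 → Pre_checkIfCanBreak s1 s2 → Spec_checkIfCanBreak s1 s2 (checkIfCanBreak s1 s2)

-- ===== LEMMAS AND PROOFS =====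

-- all characters lowercase
def pvLow (l : List Char) : Prop := ∀ c ∈ l, 97 ≤ c.toNat ∧ c.toNat ≤ 122

-- cumulative count: number of characters ≤ chr(97+k)
def pvC (l : List Char) (k : Nat) : Nat := l.countP (fun c => c.toNat ≤ 97 + k)

theorem pvCharLe (x y : Char) : x ≤ y ↔ x.toNat ≤ y.toNat :=
  ⟨fun h => Fin.mk_le_mk.mp h, Char.le_def.mpr⟩

theorem pvCount_get (l : List Char) (cnt : List Int) (hlen : cnt.length = 26)
    (hlow : pvLow l) (k : Nat) (hk : k < 26) :
    PySem.List.pyGetD (l.foldl pvCountStep cnt) (k : Int) 0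
      = PySem.List.pyGetD cnt (k : Int) 0 + (l.countP (fun c => c.toNat == 97 + k) : Int) := by
  induction l generalizing cnt with
  | nil => simp [List.countP]
  | cons ch t ih =>
    have hch := hlow ch (by simp)
    have hlow' : pvLow t := fun c hc => hlow c (by simp [hc])
    have hlen' : (pvCountStep cnt ch).length = 26 := by
      simp [pvCountStep, PySem.List.length_pySetD, hlen]
    rw [List.foldl_cons, ih (pvCountStep cnt ch) hlen' hlow']
    have hidx : ((ch.toNat : Int) - 97) = ((ch.toNat - 97 : Nat) : Int) := by omega
    have hstep : PySem.List.pyGetD (pvCountStep cnt ch) (k : Int) 0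
        = if k = ch.toNat - 97 then PySem.List.pyGetD cnt ((ch.toNat - 97 : Nat) : Int) 0 + 1
          else PySem.List.pyGetD cnt (k : Int) 0 := by
      rw [pvCountStep, hidx, PySem.List.pyGetD_pySetD_natCast cnt (ch.toNat - 97) k _ 0 (by omega)]
    rw [hstep, List.countP_cons]
    by_cases h : k = ch.toNat - 97
    · have hb : (ch.toNat == 97 + k) = true := by simp; omega
      subst h
      simp [hb]
      ring
    · have hb : (ch.toNat == 97 + k) = false := by simp; omega
      simp [h, hb]

theorem pvCount_spec (l : List Char) (hlow : pvLow l) (k : Nat) (hk : k < 26) :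
    PySem.List.pyGetD (pvCount l) (k : Int) 0 = (l.countP (fun c => c.toNat == 97 + k) : Int) := by
  rw [pvCount, pvCount_get l (List.replicate 26 0) (by simp) hlow k hk,
    PySem.List.pyGetD_natCast, List.getD_eq_getElem?_getD, List.getElem?_replicate]
  split <;> simp

theorem pvDiffLoop_iff (c1 c2 : List Int) (js : List Int) (diff : Int) :
    pvDiffLoop c1 c2 js diff = true ↔
      ∀ k < js.length, 0 ≤ diff +
        ((js.take (k+1)).map (fun i => PySem.List.pyGetD c1 i 0 - PySem.List.pyGetD c2 i 0)).sum := by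
  induction js generalizing diff with
  | nil => simp [pvDiffLoop]
  | cons j rest ih =>
    by_cases h : diff + (PySem.List.pyGetD c1 j 0 - PySem.List.pyGetD c2 j 0) < 0
    · simp only [pvDiffLoop, if_pos h]
      constructor
      · intro hfalse; exact absurd hfalse (by simp)
      · intro hall
        have := hall 0 (by simp)
        simp at this
        omega
    · simp only [pvDiffLoop, if_neg h]
      rw [ih]
      constructor
      · intro hall k hk
        cases k with
        | zero => simpa using not_lt.mp h
        | succ k' =>
          have := hall k' (by simpa using Nat.lt_of_succ_lt_succ (by simpa using hk))
          simp only [List.take_succ_cons, List.map_cons, List.sum_cons] at *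
          omega
      · intro hall k hk
        have := hall (k+1) (by simpa using Nat.succ_lt_succ hk)
        simp only [List.take_succ_cons, List.map_cons, List.sum_cons] at this
        omega

-- counting characters ≤ m+1 splits into ≤ m plus exactly m+1
theorem pvStepCount (l : List Char) (m : Nat) :
    l.countP (fun c => c.toNat ≤ m + 1)
      = l.countP (fun c => c.toNat ≤ m) + l.countP (fun c => c.toNat == m + 1) := by
  induction l with
  | nil => simp
  | cons c t ih =>
    simp only [List.countP_cons, ih]
    by_cases h1 : c.toNat ≤ m
    · have h3 : c.toNat ≤ m + 1 := by omega
      have h2 : ¬ c.toNat = m + 1 := by omega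
      simp [h2, h3, h1]; omega
    · by_cases h2 : c.toNat = m + 1
      · simp [h2]; omega
      · have h3 : ¬ c.toNat ≤ m + 1 := by omega
        simp [h1, h2, h3]

theorem pvCum (l : List Char) (hlow : pvLow l) (k : Nat) :
    ((List.range (k+1)).map (fun i => (l.countP (fun c => c.toNat == 97 + i) : Int))).sum
      = (pvC l k : Int) := by
  induction k with
  | zero =>
    rw [show (0+1) = 1 from rfl, List.range_one]
    simp only [List.map_cons, List.map_nil, List.sum_cons, List.sum_nil, pvC, add_zero]
    norm_cast
    apply List.countP_congr
    intro c hc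
    have := hlow c hc
    simp; omega
  | succ n ih =>
    rw [List.range_succ, List.map_append, List.sum_append, ih]
    simp only [List.map_cons, List.map_nil, List.sum_cons, List.sum_nil, pvC]
    have hs := pvStepCount l (97 + n)
    have harith : 97 + (n+1) = (97 + n) + 1 := by omega
    rw [harith, hs]
    push_cast
    ring

theorem pvSumSub (n : Nat) (f g : Nat → Int) :
    ((List.range n).map (fun i => f i - g i)).sum
      = ((List.range n).map f).sum - ((List.range n).map g).sum := by
  induction n with
  | zero => simp
  | succ m ih => simp [List.range_succ, ih]; ring

-- A-side characterisation: the break loop on counts of l1 / l2 decides cumulative dominance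
theorem pvLoop_spec (l1 l2 : List Char) (h1 : pvLow l1) (h2 : pvLow l2) :
    (pvDiffLoop (pvCount l1) (pvCount l2) (PySem.List.pyRange 0 26 1) 0 = true
      ↔ ∀ k < 26, pvC l2 k ≤ pvC l1 k) := by
  rw [pvDiffLoop_iff]
  have hR : PySem.List.pyRange 0 26 1 = (List.range 26).map Int.ofNat := rfl
  have hlen : (PySem.List.pyRange 0 26 1).length = 26 := rfl
  have hsum : ∀ k, k < 26 →
      (((PySem.List.pyRange 0 26 1).take (k+1)).map
        (fun i => PySem.List.pyGetD (pvCount l1) i 0 - PySem.List.pyGetD (pvCount l2) i 0)).sum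
      = (pvC l1 k : Int) - (pvC l2 k : Int) := by
    intro k hk
    rw [hR, ← List.map_take, List.take_range, List.map_map]
    have hmin : min (k+1) 26 = k + 1 := by omega
    rw [hmin]
    have hcong : ((List.range (k+1)).map
        ((fun i => PySem.List.pyGetD (pvCount l1) i 0 - PySem.List.pyGetD (pvCount l2) i 0) ∘ Int.ofNat))
        = (List.range (k+1)).map (fun i =>
            (l1.countP (fun c => c.toNat == 97 + i) : Int) - (l2.countP (fun c => c.toNat == 97 + i) : Int)) := by
      apply List.map_congr_left
      intro i hi
      have hi26 : i < 26 := by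
        have := List.mem_range.mp hi; omega
      simp only [Function.comp, Int.ofNat_eq_natCast]
      rw [pvCount_spec l1 h1 i hi26, pvCount_spec l2 h2 i hi26]
    rw [hcong, pvSumSub, pvCum l1 h1 k, pvCum l2 h2 k]
  rw [hlen]
  constructor
  · intro h k hk
    have := h k hk
    rw [hsum k hk] at this
    omega
  · intro h k hk
    have := h k hk
    rw [hsum k hk]
    omega

-- sorted-order counting: the k-th element of sorted(l) is ≤ chr(N) iff more than k chars of l are
theorem pvSortedCount (l : List Char) (N k : Nat)
    (hk : k < (PySem.List.sorted l (fun c => c) false).length) :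
    ((PySem.List.sorted l (fun c => c) false)[k].toNat ≤ N
      ↔ k < l.countP (fun c => c.toNat ≤ N)) := by
  set a := PySem.List.sorted l (fun c => c) false with ha
  have hperm : a.Perm l := PySem.List.sorted_perm l (fun c => c) false
  have hcnt : l.countP (fun c => decide (c.toNat ≤ N)) = a.countP (fun c => decide (c.toNat ≤ N)) :=
    (hperm.countP_eq _).symm
  rw [hcnt]
  constructor
  · intro h
    have hsplit : a.countP (fun c => decide (c.toNat ≤ N))
        = (a.take (k+1)).countP (fun c => decide (c.toNat ≤ N))
          + (a.drop (k+1)).countP (fun c => decide (c.toNat ≤ N)) := by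
      conv_lhs => rw [← List.take_append_drop (k+1) a]
      rw [List.countP_append]
    have htake : (a.take (k+1)).countP (fun c => decide (c.toNat ≤ N)) = (a.take (k+1)).length := by
      rw [List.countP_eq_length]
      intro x hx
      obtain ⟨j, hj, hxe⟩ := List.mem_iff_getElem.mp hx
      have hjk : j ≤ k := by
        have := hj; rw [List.length_take] at this; omega
      have hmono : a[j]'(by omega) ≤ a[k] := by
        have := PySem.List.key_sorted_getElem_mono l (fun c => c) hjk hk
        simpa [← ha] using this
      have hxj : x = a[j]'(by omega) := by rw [← hxe, List.getElem_take]
      subst hxj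
      simp only [decide_eq_true_iff]
      exact le_trans ((pvCharLe _ _).mp hmono) h
    have hlt : (a.take (k+1)).length = k + 1 := by
      rw [List.length_take]; omega
    omega
  · intro h
    by_contra hnot
    have hgt : N < a[k].toNat := Nat.lt_of_not_le hnot
    have hsplit : a.countP (fun c => decide (c.toNat ≤ N))
        = (a.take k).countP (fun c => decide (c.toNat ≤ N))
          + (a.drop k).countP (fun c => decide (c.toNat ≤ N)) := by
      conv_lhs => rw [← List.take_append_drop k a]
      rw [List.countP_append]
    have hdrop : (a.drop k).countP (fun c => decide (c.toNat ≤ N)) = 0 := by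
      rw [List.countP_eq_zero]
      intro x hx
      obtain ⟨j, hj, hxe⟩ := List.mem_iff_getElem.mp hx
      have hjlen : k + j < a.length := by
        have := hj; rw [List.length_drop] at this; omega
      have hxj : x = a[k+j]'hjlen := by rw [← hxe, List.getElem_drop]
      have hmono : a[k] ≤ a[k+j]'hjlen := by
        have := PySem.List.key_sorted_getElem_mono l (fun c => c) (Nat.le_add_right k j) (by simpa [← ha] using hjlen)
        simpa [← ha] using this
      subst hxj
      simp only [decide_eq_true_iff, not_le]
      have := (pvCharLe _ _).mp hmono
      omega
    have htk : (a.take k).countP (fun c => decide (c.toNat ≤ N)) ≤ k := by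
      calc (a.take k).countP _ ≤ (a.take k).length := List.countP_le_length
        _ ≤ k := by rw [List.length_take]; omega
    omega

-- B-side pointwise condition (one direction of B's test, on the underlying char lists)
def pvQ (x y : List Char) : Prop :=
  (PySem.List.sorted y (fun c => c) false).length ≤ (PySem.List.sorted x (fun c => c) false).length ∧
  ∀ i < (PySem.List.sorted y (fun c => c) false).length,
    (PySem.List.sorted x (fun c => c) false).getD i ' ' ≤ (PySem.List.sorted y (fun c => c) false).getD i ' '

-- the crux: cumulative-count dominance = length guard + positional comparison of the sorts
theorem pvKey (l1 l2 : List Char) (h1 : pvLow l1) (h2 : pvLow l2) :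
    ((∀ k < 26, pvC l2 k ≤ pvC l1 k) ↔ pvQ l1 l2) := by
  have hla : (PySem.List.sorted l1 (fun c => c) false).length = l1.length :=
    PySem.List.length_sorted l1 (fun c => c) false
  have hlb : (PySem.List.sorted l2 (fun c => c) false).length = l2.length :=
    PySem.List.length_sorted l2 (fun c => c) false
  constructor
  · intro hdom
    have hlen : l2.length ≤ l1.length := by
      have h25 := hdom 25 (by omega)
      unfold pvC at h25
      have e2 : l2.countP (fun c => c.toNat ≤ 97 + 25) = l2.length :=
        List.countP_eq_length.mpr (fun c hc => by have := h2 c hc; simp; omega)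
      have e1 : l1.countP (fun c => c.toNat ≤ 97 + 25) ≤ l1.length := List.countP_le_length
      omega
    have hdomN : ∀ N : Nat, l2.countP (fun c => c.toNat ≤ N) ≤ l1.countP (fun c => c.toNat ≤ N) := by
      intro N
      by_cases hNlo : N < 97
      · have e2 : l2.countP (fun c => c.toNat ≤ N) = 0 :=
          List.countP_eq_zero.mpr (fun c hc => by have := h2 c hc; simp; omega)
        omega
      · by_cases hNhi : 122 ≤ N
        · have e2 : l2.countP (fun c => c.toNat ≤ N) = l2.length :=
            List.countP_eq_length.mpr (fun c hc => by have := h2 c hc; simp; omega)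
          have e1 : l1.countP (fun c => c.toNat ≤ N) = l1.length :=
            List.countP_eq_length.mpr (fun c hc => by have := h1 c hc; simp; omega)
          omega
        · have hk : N - 97 < 26 := by omega
          have hd := hdom (N - 97) hk
          unfold pvC at hd
          have hNe : 97 + (N - 97) = N := by omega
          rw [hNe] at hd
          exact hd
    refine ⟨by omega, ?_⟩
    intro i hi
    have hia : i < (PySem.List.sorted l1 (fun c => c) false).length := by omega
    rw [List.getD_eq_getElem _ _ hi, List.getD_eq_getElem _ _ hia]
    have hb := (pvSortedCount l2 ((PySem.List.sorted l2 (fun c => c) false)[i].toNat) i hi).mp le_rfl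
    have ha := (pvSortedCount l1 ((PySem.List.sorted l2 (fun c => c) false)[i].toNat) i hia).mpr
      (lt_of_lt_of_le hb (hdomN _))
    exact (pvCharLe _ _).mpr ha
  · rintro ⟨hlenQ, hpt⟩ k hk
    unfold pvC
    rcases Nat.eq_zero_or_pos (l2.countP (fun c => c.toNat ≤ 97 + k)) with hz | hpos
    · omega
    · set t := l2.countP (fun c => c.toNat ≤ 97 + k) with ht
      have htb : t ≤ (PySem.List.sorted l2 (fun c => c) false).length := by
        rw [hlb]; exact List.countP_le_length
      have hib : t - 1 < (PySem.List.sorted l2 (fun c => c) false).length := by omega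
      have hia : t - 1 < (PySem.List.sorted l1 (fun c => c) false).length := by omega
      have hbi : (PySem.List.sorted l2 (fun c => c) false)[t-1].toNat ≤ 97 + k :=
        (pvSortedCount l2 (97 + k) (t-1) hib).mpr (by omega)
      have hab := hpt (t-1) hib
      rw [List.getD_eq_getElem _ _ hib, List.getD_eq_getElem _ _ hia] at hab
      have hai : (PySem.List.sorted l1 (fun c => c) false)[t-1].toNat ≤ 97 + k :=
        le_trans ((pvCharLe _ _).mp hab) hbi
      have hlast := (pvSortedCount l1 (97 + k) (t-1) hia).mp hai
      omega

theorem pvB_iff (s1 s2 : String) :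
    (checkIfCanBreak_alt s1 s2 = true ↔ pvQ s1.toList s2.toList ∨ pvQ s2.toList s1.toList) := by
  simp only [checkIfCanBreak_alt, pvQ, Bool.or_eq_true, Bool.and_eq_true, decide_eq_true_iff,
    List.all_eq_true, List.mem_range]

-- ===== VERDICT (by name: the statement is the Claim_ definition above) =====
set_option maxRecDepth 4096 in
theorem checkIfCanBreak_spec : Claim_equal_checkIfCanBreak := by
  intro s1 s2 _hdom hpre
  simp only [Pre_checkIfCanBreak, Bool.and_eq_true, List.all_eq_true] at hpre
  obtain ⟨ha1, ha2⟩ := hpre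
  have hall : ("abcdefghijklmnopqrstuvwxyz".toList.all
      (fun c => 97 ≤ c.toNat && c.toNat ≤ 122)) = true := by decide
  have hmem : ∀ c ∈ "abcdefghijklmnopqrstuvwxyz".toList, 97 ≤ c.toNat ∧ c.toNat ≤ 122 := by
    intro c hc
    have := List.all_eq_true.mp hall c hc
    simp at this; omega
  have h1 : pvLow s1.toList := fun c hc => hmem c (by simpa using ha1 c hc)
  have h2 : pvLow s2.toList := fun c hc => hmem c (by simpa using ha2 c hc)
  unfold Spec_checkIfCanBreak
  have hA : checkIfCanBreak s1 s2
      = (pvDiffLoop (pvCount s1.toList) (pvCount s2.toList) (PySem.List.pyRange 0 26 1) 0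
        || pvDiffLoop (pvCount s2.toList) (pvCount s1.toList) (PySem.List.pyRange 0 26 1) 0) := rfl
  have hiff : checkIfCanBreak s1 s2 = true ↔ checkIfCanBreak_alt s1 s2 = true := by
    rw [hA, Bool.or_eq_true, pvLoop_spec s1.toList s2.toList h1 h2,
      pvLoop_spec s2.toList s1.toList h2 h1, pvB_iff,
      pvKey s1.toList s2.toList h1 h2, pvKey s2.toList s1.toList h2 h1]
  cases hB : checkIfCanBreak_alt s1 s2 <;> cases hAv : checkIfCanBreak s1 s2 <;>
    simp_all
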